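-- pv_equiv track=rewrite | github.com/greenbergM/SeqMaster | scripts/dna_rna_tools.py | nucl_acid_identity
-- ===== SOURCE A (Python) =====
-- NUCLEOTIDE_SET = {'A', 'T', 'G', 'C', 'U'}
--
-- def nucl_acid_identity(seqs: tuple[str]) -> dict:
--     """
--     Check if the sequences are DNA, RNA or uncertain nucleic acid
--     by identify invalid seq elements, which are not presented in dicts above.
--     :param seqs: sequences of nucleic acids (tuple[str])
--     :return: dictionary, where the sequence is key and nucleic acid type is its value (dict)
--     """
--     seqs_identity = dict()
--     for seq in seqs:
--         nucleotides = set(seq.upper())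
--         if nucleotides.difference(NUCLEOTIDE_SET):
--             raise ValueError("Incorrect input!")
--         if 'T' in NUCLEOTIDE_SET.difference(nucleotides) and 'U' in NUCLEOTIDE_SET.difference(nucleotides):
--             seqs_identity[seq] = 'uncertain'
--         elif 'U' in NUCLEOTIDE_SET.difference(nucleotides):
--             seqs_identity[seq] = 'DNA'
--         elif 'T' in NUCLEOTIDE_SET.difference(nucleotides):
--             seqs_identity[seq] = 'RNA'
--         else:
--             raise ValueError("There are DNA-RNA hybrids in sequences!")
--     return seqs_identity
-- ===== SOURCE B (Python) =====
-- def nucl_acid_identity(seqs: tuple) -> dict: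
--     """Classify each sequence as DNA/RNA/uncertain in one pass over its characters."""
--     seqs_identity = {}
--     for seq in seqs:
--         has_t = False
--         has_u = False
--         for ch in seq:
--             ch = ch.upper()
--             if ch not in ('A', 'T', 'G', 'C', 'U'):
--                 raise ValueError("Incorrect input!")
--             if ch == 'T':
--                 has_t = True
--             elif ch == 'U':
--                 has_u = True
--         if has_t and has_u:
--             raise ValueError("There are DNA-RNA hybrids in sequences!")
--         seqs_identity[seq] = 'DNA' if has_t else ('RNA' if has_u else 'uncertain')
--     return seqs_identity
-- ===== Notes on version B (the rewrite author's own statement) =====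
-- stated objective: simpler
-- what changed: Replaces building set(seq.upper()) and three NUCLEOTIDE_SET.difference() membership tests per sequence by a single pass over the characters carrying two booleans (seen T / seen U), classifying from the flags.
import Mathlib
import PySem

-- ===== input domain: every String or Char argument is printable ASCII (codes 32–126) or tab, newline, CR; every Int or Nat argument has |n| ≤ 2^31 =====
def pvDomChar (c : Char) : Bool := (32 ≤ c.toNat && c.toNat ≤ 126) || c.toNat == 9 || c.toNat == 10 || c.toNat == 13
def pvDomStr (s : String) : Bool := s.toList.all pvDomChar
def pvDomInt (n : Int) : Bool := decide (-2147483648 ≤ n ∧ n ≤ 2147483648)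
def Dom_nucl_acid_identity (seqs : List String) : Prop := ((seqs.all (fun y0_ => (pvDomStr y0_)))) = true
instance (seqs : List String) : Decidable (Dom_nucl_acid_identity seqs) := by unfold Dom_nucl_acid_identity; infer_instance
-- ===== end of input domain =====

-- B replaces A's set-construction and repeated set-difference tests by a single pass over each
-- sequence maintaining two booleans (has T / has U); objective: simpler.


-- ===== PORT A =====
-- NUCLEOTIDE_SET = {'A', 'T', 'G', 'C', 'U'}
def pvNucSet : PySem.Set Char := PySem.Set.ofList ['A', 'T', 'G', 'C', 'U']

-- the body of A's loop for one seq: some label, or none where A raises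
def pvClassifyA (seq : String) : Option String :=
  let nucleotides : PySem.Set Char := PySem.Set.ofList (PySem.Chars.upper seq.toList)
  if (PySem.Set.diff nucleotides pvNucSet) ≠ [] then none            -- raise ValueError("Incorrect input!")
  else if (PySem.Set.contains (PySem.Set.diff pvNucSet nucleotides) 'T')
       && (PySem.Set.contains (PySem.Set.diff pvNucSet nucleotides) 'U') then some "uncertain"
  else if PySem.Set.contains (PySem.Set.diff pvNucSet nucleotides) 'U' then some "DNA"
  else if PySem.Set.contains (PySem.Set.diff pvNucSet nucleotides) 'T' then some "RNA"
  else none                                                          -- raise ValueError("…hybrids…")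

def pvGoA : List String → PySem.Dict String String → Option (PySem.Dict String String)
  | [], d => some d
  | seq :: rest, d =>
    match pvClassifyA seq with
    | none => none
    | some v => pvGoA rest (d.insert seq v)

def nucl_acid_identity (seqs : List String) : List (String × String) :=
  match pvGoA seqs PySem.Dict.empty with
  | some d => d.items
  | none => []          -- A raises here; excluded by Pre_

-- ===== PORT B =====
-- one pass over the characters, carrying the two flags; none where B raises "Incorrect input!"
def pvScanB : List Char → Bool → Bool → Option (Bool × Bool)
  | [], hasT, hasU => some (hasT, hasU)
  | c :: cs, hasT, hasU =>
    let ch := PySem.Chars.upperChar c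
    if !(['A', 'T', 'G', 'C', 'U'].contains ch) then none
    else if ch = 'T' then pvScanB cs true hasU
    else if ch = 'U' then pvScanB cs hasT true
    else pvScanB cs hasT hasU

def pvClassifyB (seq : String) : Option String :=
  match pvScanB seq.toList false false with
  | none => none
  | some (hasT, hasU) =>
    if hasT && hasU then none                -- raise ValueError("…hybrids…")
    else some (if hasT then "DNA" else if hasU then "RNA" else "uncertain")

def pvGoB : List String → PySem.Dict String String → Option (PySem.Dict String String)
  | [], d => some d
  | seq :: rest, d =>
    match pvClassifyB seq with
    | none => none
    | some v => pvGoB rest (d.insert seq v)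

def nucl_acid_identity_alt (seqs : List String) : List (String × String) :=
  match pvGoB seqs PySem.Dict.empty with
  | some d => d.items
  | none => []

-- ===== PRECONDITION & SPEC =====
-- Pre_ excludes exactly the inputs on which A raises a ValueError: a sequence containing a
-- character other than A/T/G/C/U (case-insensitively), or a sequence containing both T and U.
def Pre_nucl_acid_identity (seqs : List String) : Prop :=
  ∀ s ∈ seqs,
    (s.toList.all (fun c => (['A', 'T', 'G', 'C', 'U'] : List Char).contains (PySem.Chars.upperChar c))) = true ∧
    ¬(('T' ∈ s.toList.map PySem.Chars.upperChar) ∧ ('U' ∈ s.toList.map PySem.Chars.upperChar))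
instance (seqs : List String) : Decidable (Pre_nucl_acid_identity seqs) := by
  unfold Pre_nucl_acid_identity; infer_instance

def pvWitness_nucl_acid_identity : List String := ["ATG", "augc", "", "GGCC"]

def Spec_nucl_acid_identity (seqs : List String) (out : List (String × String)) : Prop := out = nucl_acid_identity_alt seqs
instance (seqs : List String) (out : List (String × String)) : Decidable (Spec_nucl_acid_identity seqs out) := by unfold Spec_nucl_acid_identity; infer_instance

-- ===== CLAIM (what is proved, stated in full; the proofs are below) =====
def Claim_equal_nucl_acid_identity : Prop := ∀ (seqs : List String), Dom_nucl_acid_identity seqs → Pre_nucl_acid_identity seqs → Spec_nucl_acid_identity seqs (nucl_acid_identity seqs)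

-- ===== LEMMAS AND PROOFS =====

-- scan characterization: when every (uppercased) char is a nucleotide, the scan returns the flags
lemma pvScanB_char (cs : List Char) :
    ∀ (t u : Bool),
    (cs.all (fun c => (['A', 'T', 'G', 'C', 'U'] : List Char).contains (PySem.Chars.upperChar c))) = true →
    pvScanB cs t u = some (t || (cs.map PySem.Chars.upperChar).contains 'T',
                           u || (cs.map PySem.Chars.upperChar).contains 'U') := by
  induction cs with
  | nil => intro t u _; simp [pvScanB]
  | cons c cs ih =>
    intro t u h
    simp only [List.all_cons, Bool.and_eq_true] at h
    obtain ⟨hc, hcs⟩ := h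
    rw [pvScanB, if_neg (by rw [hc]; simp)]
    by_cases hT : PySem.Chars.upperChar c = 'T'
    · rw [if_pos hT, ih true u hcs]
      simp [hT]
    · rw [if_neg hT]
      by_cases hU : PySem.Chars.upperChar c = 'U'
      · rw [if_pos hU, ih t true hcs]
        simp [hU]
      · have hT' : ('T' : Char) ≠ PySem.Chars.upperChar c := fun h => hT h.symm
        have hU' : ('U' : Char) ≠ PySem.Chars.upperChar c := fun h => hU h.symm
        rw [if_neg hU, ih t u hcs]
        simp [hT', hU']

-- the two per-sequence classifiers agree on every sequence Pre_ admits
lemma classify_eq (s : String)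
    (hvalid : (s.toList.all (fun c => (['A', 'T', 'G', 'C', 'U'] : List Char).contains (PySem.Chars.upperChar c))) = true)
    (hnot : ¬(('T' ∈ s.toList.map PySem.Chars.upperChar) ∧ ('U' ∈ s.toList.map PySem.Chars.upperChar))) :
    pvClassifyA s = pvClassifyB s := by
  have hupper : PySem.Chars.upper s.toList = s.toList.map PySem.Chars.upperChar := rfl
  set l := s.toList.map PySem.Chars.upperChar with hl
  -- A's first test: the difference is empty
  have hdiff_nil : PySem.Set.diff (PySem.Set.ofList (PySem.Chars.upper s.toList)) pvNucSet = [] := by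
    rw [List.eq_nil_iff_forall_not_mem]
    intro x hx
    rw [PySem.Set.mem_diff] at hx
    obtain ⟨hx1, hx2⟩ := hx
    rw [PySem.Set.mem_ofList, hupper, hl] at hx1
    apply hx2
    rw [pvNucSet, PySem.Set.mem_ofList]
    obtain ⟨c, hc, hceq⟩ := List.mem_map.mp hx1
    have := List.all_eq_true.mp hvalid c hc
    rw [hceq] at this
    exact List.contains_iff_mem.mp this
  -- A's later tests as membership in l
  have hmemT : ∀ (x : Char), x ∈ (['A','T','G','C','U'] : List Char) →
      PySem.Set.contains (PySem.Set.diff pvNucSet (PySem.Set.ofList (PySem.Chars.upper s.toList))) x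
      = !(l.contains x) := by
    intro x hxnuc
    by_cases hx : x ∈ l
    · simp only [List.contains_iff_mem.mpr hx, Bool.not_true]
      rw [Bool.eq_false_iff]
      intro hcon
      rw [PySem.Set.contains_iff, PySem.Set.mem_diff, PySem.Set.mem_ofList, hupper] at hcon
      exact hcon.2 hx
    · have : l.contains x = false := by
        rw [Bool.eq_false_iff]; intro hcon; exact hx (List.contains_iff_mem.mp hcon)
      rw [this, Bool.not_false, PySem.Set.contains_iff, PySem.Set.mem_diff]
      constructor
      · rw [pvNucSet, PySem.Set.mem_ofList]; exact hxnuc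
      · rw [PySem.Set.mem_ofList, hupper]; exact hx
  have hT := hmemT 'T' (by decide)
  have hU := hmemT 'U' (by decide)
  -- B's scan
  unfold pvClassifyA pvClassifyB
  rw [pvScanB_char s.toList false false hvalid]
  rw [if_neg (by simp [hdiff_nil]), hT, hU]
  have hTe : ('T' ∈ l) ↔ (∃ a ∈ s.toList, PySem.Chars.upperChar a = 'T') := by
    rw [hl]; simp
  have hUe : ('U' ∈ l) ↔ (∃ a ∈ s.toList, PySem.Chars.upperChar a = 'U') := by
    rw [hl]; simp
  by_cases hTm : 'T' ∈ l
  · by_cases hUm : 'U' ∈ l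
    · exact absurd ⟨hTm, hUm⟩ hnot
    · simp [hTm, hUm, ← hTe, ← hUe]
  · by_cases hUm : 'U' ∈ l <;> simp [hTm, hUm, ← hTe, ← hUe]

lemma go_eq (seqs : List String) (hpre : Pre_nucl_acid_identity seqs) :
    ∀ d, pvGoA seqs d = pvGoB seqs d := by
  induction seqs with
  | nil => intro d; rfl
  | cons s rest ih =>
    intro d
    have hs := hpre s (by simp)
    have hrest : Pre_nucl_acid_identity rest := fun t ht => hpre t (by simp [ht])
    simp only [pvGoA, pvGoB, ← classify_eq s hs.1 hs.2]
    cases pvClassifyA s with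
    | none => rfl
    | some v => exact ih hrest _

-- ===== VERDICT (by name: the statement is the Claim_ definition above) =====
theorem nucl_acid_identity_spec : Claim_equal_nucl_acid_identity := by
  intro seqs _ hpre
  unfold Spec_nucl_acid_identity nucl_acid_identity nucl_acid_identity_alt
  rw [go_eq seqs hpre]
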